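-- pv_equiv track=rewrite | github.com/sbs524/Problem-Solved | Python/Programmers/이분탐색/입국심사(시간초과).py | solution
-- ===== SOURCE A (Python) =====
-- def solution(n, times):
--     end=n*min(times)
--     start=1
--     cnt=0
--     mid=0
--
--     while start<=end:
--         mid=(start+end)//2
--         cnt=0
--         for time in times:
--             cnt+=mid//time
--
--         if cnt==n:
--             break
--         if cnt<n:
--             start=mid+1
--         elif cnt>n:
--             end=mid-1
--
--     if cnt<n:
--         mid+=1
--
--     while mid>0:
--         mid-=1
--         cnt=0
--         for time in times:
--             cnt+=mid//time
--         if cnt<n: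
--             mid+=1
--             break
--
--
--     return mid
-- ===== SOURCE B (Python) =====
-- def solution(n, times):
--     lo, hi = 1, n * min(times)
--     while lo < hi:
--         mid = (lo + hi) // 2
--         if sum(mid // t for t in times) >= n:
--             hi = mid
--         else:
--             lo = mid + 1
--     return lo
-- ===== Notes on version B (the rewrite author's own statement) =====
-- stated objective: faster
-- what changed: Replaces A's three-branch binary search (break on cnt==n) followed by a linear walk-down over the cnt-plateau with a single lower-bound binary search for the smallest mid with sum(mid//t for t in times) >= n.
-- outside the precondition, e.g. on solution(0, [3]): A returns 0, B returns 1; on solution(-2, [-3]): A returns 0, B returns 1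
import Mathlib
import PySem

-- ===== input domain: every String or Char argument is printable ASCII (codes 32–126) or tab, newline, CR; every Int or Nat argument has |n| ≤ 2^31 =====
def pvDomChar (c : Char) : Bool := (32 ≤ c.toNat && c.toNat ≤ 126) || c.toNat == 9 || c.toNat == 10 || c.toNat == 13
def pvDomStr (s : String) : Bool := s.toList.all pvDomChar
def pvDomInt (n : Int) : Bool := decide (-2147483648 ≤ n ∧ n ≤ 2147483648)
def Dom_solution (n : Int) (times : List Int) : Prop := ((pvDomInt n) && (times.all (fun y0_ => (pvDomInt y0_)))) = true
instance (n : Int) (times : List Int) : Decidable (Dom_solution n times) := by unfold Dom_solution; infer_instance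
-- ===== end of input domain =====

-- B replaces A's three-branch binary search plus linear walk-down with a single
-- lower-bound binary search for the smallest mid with sum(mid // t) >= n; the
-- theorems state return-value equality on Pre_solution.

-- midpoint facts cited by the ports' termination proofs
theorem pvMid_lb {lo hi : Int} (h : lo ≤ hi) : lo ≤ PySem.Int.floordiv (lo + hi) 2 :=
  (PySem.Int.floordiv_two_mid_bounds h).1
theorem pvMid_ub {lo hi : Int} (h : lo ≤ hi) : PySem.Int.floordiv (lo + hi) 2 ≤ hi :=
  (PySem.Int.floordiv_two_mid_bounds h).2
theorem pvMid_lt {lo hi : Int} (h : lo < hi) : PySem.Int.floordiv (lo + hi) 2 < hi :=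
  (PySem.Int.floordiv_lt_iff_lt_mul (by norm_num)).mpr (by omega)

-- ===== PORT A =====
-- 'cnt=0; for time in times: cnt+=mid//time'
def pvCnt (times : List Int) (mid : Int) : Int :=
  times.foldl (fun c t => c + PySem.Int.floordiv mid t) 0

-- first while loop; carries (mid, cnt) across iterations as Python does
def solLoop1 (n : Int) (times : List Int) (start e mid cnt : Int) : Int × Int :=
  if h : start ≤ e then
    let m := PySem.Int.floordiv (start + e) 2
    let c := pvCnt times m
    if c = n then (m, c)
    else if c < n then solLoop1 n times (m + 1) e m c
    else solLoop1 n times start (m - 1) m c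
  else (mid, cnt)
termination_by (e + 1 - start).toNat
decreasing_by
  · have := pvMid_lb h; omega
  · have := pvMid_lb h; have := pvMid_ub h; omega

-- second while loop (walk down until cnt < n, then mid += 1 and break)
def solLoop2 (n : Int) (times : List Int) (mid : Int) : Int :=
  if h : mid > 0 then
    let m := mid - 1
    let c := pvCnt times m
    if c < n then m + 1
    else solLoop2 n times m
  else mid
termination_by mid.toNat
decreasing_by omega

def solution (n : Int) (times : List Int) : Int :=
  let e := n * ((PySem.List.min? times (fun x => x)).getD 0)   -- min(times); Pre_ excludes []
  let r := solLoop1 n times 1 e 0 0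
  let mid := if r.2 < n then r.1 + 1 else r.1
  solLoop2 n times mid

-- ===== PORT B =====
-- 'sum(mid // t for t in times)'
def pvCntB (times : List Int) (mid : Int) : Int :=
  (times.map (fun t => PySem.Int.floordiv mid t)).sum

-- 'while lo < hi: mid=(lo+hi)//2; if cnt>=n: hi=mid else lo=mid+1'
def solAltLoop (n : Int) (times : List Int) (lo hi : Int) : Int :=
  if h : lo < hi then
    let m := PySem.Int.floordiv (lo + hi) 2
    if n ≤ pvCntB times m then solAltLoop n times lo m
    else solAltLoop n times (m + 1) hi
  else lo
termination_by (hi - lo).toNat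
decreasing_by
  · have := pvMid_lb (le_of_lt h); have := pvMid_lt h; omega
  · have := pvMid_lb (le_of_lt h); omega

def solution_alt (n : Int) (times : List Int) : Int :=
  solAltLoop n times 1 (n * ((PySem.List.min? times (fun x => x)).getD 0))

-- ===== PRECONDITION & SPEC =====
-- Pre_ excludes empty times (min([]) raises ValueError) and 0 ∈ times (ZeroDivisionError),
-- and restricts to the problem's natural domain n ≥ 1 (a number of people): for n ≤ 0,
-- outside that domain, A returns 0 while B returns 1.
def Pre_solution (n : Int) (times : List Int) : Prop :=
  1 ≤ n ∧ times ≠ [] ∧ ¬ (0 : Int) ∈ times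
instance (n : Int) (times : List Int) : Decidable (Pre_solution n times) := by
  unfold Pre_solution; infer_instance

def pvWitness_solution : Int × List Int := (6, [7, 10])

def Spec_solution (n : Int) (times : List Int) (out : Int) : Prop := out = solution_alt n times
instance (n : Int) (times : List Int) (out : Int) : Decidable (Spec_solution n times out) := by
  unfold Spec_solution; infer_instance

-- ===== CLAIM (what is proved, stated in full; the proofs are below) =====
def Claim_equal_solution : Prop := ∀ (n : Int) (times : List Int), Dom_solution n times → Pre_solution n times → Spec_solution n times (solution n times)

-- ===== LEMMAS AND PROOFS =====

theorem pvCntB_eq (times : List Int) (x : Int) : pvCntB times x = pvCnt times x := by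
  simp [pvCnt, pvCntB, PySem.List.foldl_add]

theorem pvCnt_zero (times : List Int) : pvCnt times 0 = 0 := by
  rw [← pvCntB_eq]
  simp [pvCntB, PySem.Int.floordiv]

theorem pvCnt_mono {times : List Int} (hpos : ∀ t ∈ times, 0 < t) {x y : Int}
    (hxy : x ≤ y) : pvCnt times x ≤ pvCnt times y := by
  rw [← pvCntB_eq, ← pvCntB_eq]
  refine List.sum_le_sum (fun t ht => ?_)
  have h := hpos t ht
  rw [PySem.Int.floordiv_eq_ediv_of_pos h, PySem.Int.floordiv_eq_ediv_of_pos h]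
  exact Int.ediv_le_ediv h hxy

theorem pvCnt_nonpos {times : List Int} (hpos : ∀ t ∈ times, 0 < t) {x : Int}
    (hx : x ≤ 0) : pvCnt times x ≤ 0 := by
  have := pvCnt_mono hpos hx
  rw [pvCnt_zero] at this
  exact this

theorem pvCnt_ge_single {times : List Int} (hpos : ∀ t ∈ times, 0 < t) {x t0 : Int}
    (hx : 0 ≤ x) (ht : t0 ∈ times) : PySem.Int.floordiv x t0 ≤ pvCnt times x := by
  rw [← pvCntB_eq]
  refine List.single_le_sum (fun b hb => ?_) _ (List.mem_map_of_mem ht)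
  obtain ⟨t, htm, rfl⟩ := List.mem_map.mp hb
  rw [PySem.Int.floordiv_eq_ediv_of_pos (hpos t htm)]
  exact Int.ediv_nonneg hx (le_of_lt (hpos t htm))

-- the second while loop walks down to the least a with n ≤ cnt(a)
theorem solLoop2_eq (n : Int) (times : List Int) (a : Int)
    (hpos : ∀ t ∈ times, 0 < t)
    (ha : n ≤ pvCnt times a) (ha' : pvCnt times (a - 1) < n) (h1 : 1 ≤ a) :
    ∀ k : Nat, ∀ mid : Int, a ≤ mid → (mid - a).toNat = k → solLoop2 n times mid = a := by
  intro k
  induction k with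
  | zero =>
    intro mid hm hk
    have : mid = a := by omega
    rw [this]
    rw [solLoop2, dif_pos (by omega : a > 0)]
    dsimp only
    rw [if_pos ha']
    omega
  | succ k ih =>
    intro mid hm hk
    rw [solLoop2, dif_pos (by omega : mid > 0)]
    dsimp only
    rw [if_neg (by
      have := pvCnt_mono hpos (show a ≤ mid - 1 by omega)
      omega)]
    exact ih (mid - 1) (by omega) (by omega)

-- the first loop ends at a point mid' = (cnt<n ? mid+1 : mid) with n ≤ cnt(mid')
theorem solLoop1_post (n : Int) (times : List Int)
    (hpos : ∀ t ∈ times, 0 < t) :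
    ∀ k : Nat, ∀ s e mid cnt : Int, (e + 1 - s).toNat = k →
      (∀ x : Int, e < x → n ≤ pvCnt times x) →
      cnt = pvCnt times mid →
      (e < s → n ≤ pvCnt times (if cnt < n then mid + 1 else mid)) →
      (solLoop1 n times s e mid cnt).2 = pvCnt times (solLoop1 n times s e mid cnt).1 ∧
      n ≤ pvCnt times (if (solLoop1 n times s e mid cnt).2 < n
                       then (solLoop1 n times s e mid cnt).1 + 1
                       else (solLoop1 n times s e mid cnt).1) := by
  intro k
  induction k using Nat.strong_induction_on with
  | _ k ih =>
  intro s e mid cnt hk hhigh hcnt hexit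
  rw [solLoop1]
  by_cases hse : s ≤ e
  · rw [dif_pos hse]
    dsimp only
    have hm1 := pvMid_lb hse
    have hm2 := pvMid_ub hse
    by_cases h1 : pvCnt times (PySem.Int.floordiv (s + e) 2) = n
    · rw [if_pos h1]
      refine ⟨rfl, ?_⟩
      dsimp only
      rw [if_neg (by omega)]
      omega
    · rw [if_neg h1]
      by_cases h2 : pvCnt times (PySem.Int.floordiv (s + e) 2) < n
      · rw [if_pos h2]
        refine ih (e + 1 - (PySem.Int.floordiv (s + e) 2 + 1)).toNat (by omega) _ _ _ _
          rfl hhigh rfl ?_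
        intro hlt
        rw [if_pos h2]
        exact hhigh _ (by omega)
      · rw [if_neg h2]
        refine ih (PySem.Int.floordiv (s + e) 2 - s).toNat (by omega) _ _ _ _ (by omega) ?_ rfl ?_
        · intro x hx
          exact le_trans (by omega) (pvCnt_mono hpos (show PySem.Int.floordiv (s + e) 2 ≤ x by omega))
        · intro _
          rw [if_neg h2]
          omega
  · rw [dif_neg hse]
    exact ⟨hcnt, hexit (by omega)⟩

-- B's loop converges to the least a with n ≤ cnt(a)
theorem solAltLoop_eq (n : Int) (times : List Int) (a : Int)
    (hpos : ∀ t ∈ times, 0 < t)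
    (ha : n ≤ pvCnt times a) (ha' : pvCnt times (a - 1) < n) :
    ∀ k : Nat, ∀ lo hi : Int, (hi - lo).toNat = k → lo ≤ a → a ≤ hi →
      solAltLoop n times lo hi = a := by
  intro k
  induction k using Nat.strong_induction_on with
  | _ k ih
  intro lo hi hk hlo hhi
  rw [solAltLoop]
  by_cases hlh : lo < hi
  · rw [dif_pos hlh]
    dsimp only
    have hb1 := pvMid_lb (le_of_lt hlh)
    have hb2 := pvMid_lt hlh
    by_cases hp : n ≤ pvCntB times (PySem.Int.floordiv (lo + hi) 2)
    · rw [if_pos hp]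
      rw [pvCntB_eq] at hp
      have ham : a ≤ PySem.Int.floordiv (lo + hi) 2 := by
        by_contra hc
        push_neg at hc
        have := pvCnt_mono hpos (show PySem.Int.floordiv (lo + hi) 2 ≤ a - 1 by omega)
        omega
      exact ih (PySem.Int.floordiv (lo + hi) 2 - lo).toNat (by omega) _ _ rfl hlo ham
    · rw [if_neg hp]
      rw [pvCntB_eq] at hp
      have ham : PySem.Int.floordiv (lo + hi) 2 + 1 ≤ a := by
        by_contra hc
        push_neg at hc
        have := pvCnt_mono hpos (show a ≤ PySem.Int.floordiv (lo + hi) 2 by omega)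
        omega
      exact ih (hi - (PySem.Int.floordiv (lo + hi) 2 + 1)).toNat (by omega) _ _ rfl ham hhi
  · rw [dif_neg hlh]
    omega

-- ===== VERDICT (by name: the statement is the Claim_ definition above) =====
theorem solution_spec : Claim_equal_solution := by
  unfold Claim_equal_solution
  intro n times _ hpre
  obtain ⟨hn, hne, h0⟩ := hpre
  unfold Spec_solution solution solution_alt
  obtain ⟨mn, hmn⟩ : ∃ mn, PySem.List.min? times (fun x => x) = some mn := by
    cases hq : PySem.List.min? times (fun x => x) with
    | none => exact absurd ((PySem.List.min?_eq_none_iff times _).mp hq) hne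
    | some m => exact ⟨m, rfl⟩
  have hmem : mn ∈ times := PySem.List.min?_mem hmn
  have hmin : ∀ t ∈ times, mn ≤ t := PySem.List.min?_isMin hmn
  rw [hmn]
  dsimp only [Option.getD_some]
  by_cases hmpos : 0 < mn
  · -- all service times positive: both sides compute the least a with n ≤ cnt(a)
    have hpos : ∀ t ∈ times, 0 < t := fun t ht => lt_of_lt_of_le hmpos (hmin t ht)
    have hnm1 : 1 ≤ n * mn := by
      have := mul_le_mul hn hmpos (by norm_num) (by omega)
      omega
    have hPtop : n ≤ pvCnt times (n * mn) := by
      have h1 : PySem.Int.floordiv (n * mn) mn = n := by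
        rw [PySem.Int.floordiv_eq_ediv_of_pos hmpos]
        exact Int.mul_ediv_cancel n (by omega)
      calc n = PySem.Int.floordiv (n * mn) mn := h1.symm
        _ ≤ pvCnt times (n * mn) := pvCnt_ge_single hpos (by omega) hmem
    obtain ⟨a, ⟨haP, ha1⟩, hleast⟩ :=
      Int.exists_least_of_bdd (P := fun x => n ≤ pvCnt times x ∧ 1 ≤ x)
        ⟨1, fun z hz => hz.2⟩ ⟨n * mn, hPtop, hnm1⟩
    have ha' : pvCnt times (a - 1) < n := by
      by_contra hc
      push_neg at hc
      have ha1' : 1 ≤ a - 1 := by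
        by_contra hc2
        push_neg at hc2
        have := pvCnt_nonpos hpos (show a - 1 ≤ 0 by omega)
        omega
      have := hleast (a - 1) ⟨hc, ha1'⟩
      omega
    obtain ⟨hr2, hrP⟩ := solLoop1_post n times hpos (n * mn + 1 - 1).toNat 1 (n * mn) 0 0
      rfl (fun x hx => le_trans hPtop (pvCnt_mono hpos (by omega)))
      (pvCnt_zero times).symm (by intro h; omega)
    have hmid1 : 1 ≤ (if (solLoop1 n times 1 (n * mn) 0 0).2 < n
        then (solLoop1 n times 1 (n * mn) 0 0).1 + 1
        else (solLoop1 n times 1 (n * mn) 0 0).1) := by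
      by_contra hc
      push_neg at hc
      have := pvCnt_nonpos hpos (show (if (solLoop1 n times 1 (n * mn) 0 0).2 < n
        then (solLoop1 n times 1 (n * mn) 0 0).1 + 1
        else (solLoop1 n times 1 (n * mn) 0 0).1) ≤ 0 by omega)
      omega
    have hamid := hleast _ ⟨hrP, hmid1⟩
    rw [solLoop2_eq n times a hpos haP ha' ha1 _ _ hamid rfl]
    rw [solAltLoop_eq n times a hpos haP ha' (n * mn - 1).toNat 1 (n * mn) rfl ha1
      (hleast (n * mn) ⟨hPtop, hnm1⟩)]
  · -- min(times) < 0: end = n*min < 1, both searches collapse and return 1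
    have hmn0 : mn ≠ 0 := fun h => h0 (h ▸ hmem)
    have hend : n * mn ≤ -1 := by
      have : n * mn ≤ 1 * mn := mul_le_mul_of_nonpos_right hn (by omega)
      omega
    rw [solLoop1, dif_neg (by omega : ¬ (1 : Int) ≤ n * mn)]
    dsimp only
    rw [if_pos (by omega : (0 : Int) < n)]
    rw [solLoop2, dif_pos (by norm_num : (0 : Int) + 1 > 0)]
    dsimp only
    rw [if_pos (by rw [show (0 : Int) + 1 - 1 = 0 by omega, pvCnt_zero]; omega)]
    rw [solAltLoop, dif_neg (by omega : ¬ (1 : Int) < n * mn)]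
    norm_num
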